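-- pv_equiv track=rewrite | github.com/Yondaime008/ProjectEuler | problem60.py | valid_five
-- ===== SOURCE A (Python) =====
-- import itertools
--
-- def valid_five(a, b, c, d, e, lop):
--     list = []
--     list.append(a)
--     list.append(b)
--     list.append(c)
--     list.append(d)
--     list.append(e)
--     for i in itertools.combinations(list, 2):
--         num = str(i[0])+str(i[1])
--         num_inv = str(i[1])+ str(i[0])
--         if int(num) not in lop or int(num_inv) not in lop:
--             return False
--     return True
-- ===== SOURCE B (Python) =====
-- import itertools
--
-- def valid_five(a, b, c, d, e, lop):
--     # Inverted traversal: index the 20 required concatenations in a hash set once,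
--     # then make a single pass over lop discarding hits; no membership scan of lop.
--     try:
--         required = {int(str(x) + str(y))
--                     for x, y in itertools.permutations((a, b, c, d, e), 2)}
--     except ValueError:
--         return False
--     for v in lop:
--         required.discard(v)
--     return not required
-- ===== Notes on version B (the rewrite author's own statement) =====
-- stated objective: alternative
-- what changed: A loops over itertools.combinations and scans lop for both concatenations of each pair with an early False return; B inverts the traversal: it indexes all 20 ordered-pair concatenations in a hash set once, then makes one pass over lop discarding hits and returns whether the set emptied, so the per-pair membership scan of lop disappears.
import Mathlib
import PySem

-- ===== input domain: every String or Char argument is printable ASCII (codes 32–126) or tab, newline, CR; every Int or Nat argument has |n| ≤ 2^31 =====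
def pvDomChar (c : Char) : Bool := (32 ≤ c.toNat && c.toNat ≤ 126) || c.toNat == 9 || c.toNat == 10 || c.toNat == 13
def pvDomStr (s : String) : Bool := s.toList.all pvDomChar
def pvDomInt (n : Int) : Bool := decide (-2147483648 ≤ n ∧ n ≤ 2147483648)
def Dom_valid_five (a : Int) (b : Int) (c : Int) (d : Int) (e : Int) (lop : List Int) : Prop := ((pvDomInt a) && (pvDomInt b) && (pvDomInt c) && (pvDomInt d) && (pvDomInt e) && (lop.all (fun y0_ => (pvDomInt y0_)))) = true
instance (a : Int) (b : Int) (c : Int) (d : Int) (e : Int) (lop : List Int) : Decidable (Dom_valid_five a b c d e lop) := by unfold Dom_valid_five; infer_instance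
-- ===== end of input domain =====

-- B inverts A's traversal: it indexes the 20 required concatenations in a set once and
-- makes a single pass over lop discarding hits, instead of scanning lop per pair
-- (objective: alternative).

-- int(str(x) + str(y)); none = ValueError (both Pythons contain this exact expression)
def pvCat (x y : Int) : Option Int :=
  PySem.Int.ofStr? (PySem.Int.toStr x ++ PySem.Int.toStr y)

-- ===== PORT A =====
-- itertools.combinations(list, 2), in itertools order
def pvComb2 : List Int → List (Int × Int)
  | [] => []
  | x :: rest => rest.map (fun y => (x, y)) ++ pvComb2 rest

-- the for-loop with its early `return False`; a `none` from pvCat is Python's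
-- ValueError (excluded by Pre_), rendered as `false` here
def pvLoopA (lop : List Int) : List (Int × Int) → Bool
  | [] => true
  | (x, y) :: rest =>
    match pvCat x y with
    | none => false
    | some num =>
      if !(lop.contains num) then false
      else
        match pvCat y x with
        | none => false
        | some ninv =>
          if !(lop.contains ninv) then false else pvLoopA lop rest

def valid_five (a : Int) (b : Int) (c : Int) (d : Int) (e : Int) (lop : List Int) : Bool :=
  pvLoopA lop (pvComb2 [a, b, c, d, e])

-- ===== PORT B =====
-- the try-block building the set comprehension over itertools.permutations((a..e), 2);
-- `none` from pvCat is the caught ValueError (never reached once every value is nonnegative)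
def pvBuildB (s : PySem.Set Int) : List (List Int) → Option (PySem.Set Int)
  | [] => some s
  | p :: rest =>
    match pvCat (p.getD 0 0) (p.getD 1 0) with
    | none => none
    | some v => pvBuildB (PySem.Set.add s v) rest

def valid_five_alt (a : Int) (b : Int) (c : Int) (d : Int) (e : Int) (lop : List Int) : Bool :=
  match pvBuildB PySem.Set.empty (PySem.List.permutations [a, b, c, d, e] 2) with
  | none => false                                       -- `except ValueError: return False`
  | some required =>
    (lop.foldl PySem.Set.discard required).isEmpty      -- the discard pass, then `not required`

-- ===== PRECONDITION & SPEC =====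
-- the 10 unordered pairs in A's combination order
def pvPairs10 (a b c d e : Int) : List (Int × Int) :=
  [(a,b),(a,c),(a,d),(a,e),(b,c),(b,d),(b,e),(c,d),(c,e),(d,e)]

-- pair (x,y) fully passes A's test: both concatenations parse and lie in lop
def pvPass (lop : List Int) (x y : Int) : Bool :=
  ((pvCat x y).any lop.contains) && ((pvCat y x).any lop.contains)

-- A evaluates pair (x,y) without a ValueError: int(num) parses, and int(num_inv)
-- (evaluated only when int(num) ∈ lop) parses too
def pvOkAt (lop : List Int) (x y : Int) : Bool :=
  (pvCat x y).isSome && (!((pvCat x y).any lop.contains) || (pvCat y x).isSome)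

-- Pre_ excludes exactly the inputs on which A raises ValueError: some pair, reached
-- because every earlier pair fully passed, has an unparseable concatenation
-- (a negative right operand, e.g. int("1-1")) at the point A evaluates it.
def Pre_valid_five (a : Int) (b : Int) (c : Int) (d : Int) (e : Int) (lop : List Int) : Prop :=
  ∀ k : Nat, k < 10 →
    ((pvPairs10 a b c d e).take k).all (fun p => pvPass lop p.1 p.2) = true →
    pvOkAt lop ((pvPairs10 a b c d e).getD k (0, 0)).1 ((pvPairs10 a b c d e).getD k (0, 0)).2 = true
instance (a : Int) (b : Int) (c : Int) (d : Int) (e : Int) (lop : List Int) : Decidable (Pre_valid_five a b c d e lop) := by unfold Pre_valid_five; infer_instance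

def pvWitness_valid_five : Int × Int × Int × Int × Int × List Int :=
  (3, 7, 109, 673, 2, [37, 73, 3109, 1093])

def Spec_valid_five (a : Int) (b : Int) (c : Int) (d : Int) (e : Int) (lop : List Int) (out : Bool) : Prop := out = valid_five_alt a b c d e lop
instance (a : Int) (b : Int) (c : Int) (d : Int) (e : Int) (lop : List Int) (out : Bool) : Decidable (Spec_valid_five a b c d e lop out) := by unfold Spec_valid_five; infer_instance

-- ===== CLAIM (what is proved, stated in full; the proofs are below) =====
def Claim_equal_valid_five : Prop := ∀ (a : Int) (b : Int) (c : Int) (d : Int) (e : Int) (lop : List Int), Dom_valid_five a b c d e lop → Pre_valid_five a b c d e lop → Spec_valid_five a b c d e lop (valid_five a b c d e lop)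


-- ===== LEMMAS AND PROOFS =====

-- the per-direction check A performs: the concatenation parses and lies in lop
def pvChk (lop : List Int) (x y : Int) : Bool :=
  match pvCat x y with
  | none => false
  | some v => lop.contains v

theorem pvLoopA_eq_all (lop : List Int) (ps : List (Int × Int)) :
    pvLoopA lop ps = ps.all (fun p => pvChk lop p.1 p.2 && pvChk lop p.2 p.1) := by
  induction ps with
  | nil => rfl
  | cons p rest ih =>
    obtain ⟨x, y⟩ := p
    rw [List.all_cons]
    show pvLoopA lop ((x, y) :: rest) =
      ((pvChk lop x y && pvChk lop y x) && rest.all (fun p => pvChk lop p.1 p.2 && pvChk lop p.2 p.1))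
    rw [← ih]
    simp only [pvLoopA]
    unfold pvChk
    cases pvCat x y with
    | none => simp
    | some num =>
      cases pvCat y x with
      | none => by_cases h : num ∈ lop <;> simp [h]
      | some ninv =>
        by_cases h : num ∈ lop <;> by_cases h2 : ninv ∈ lop <;> simp [h, h2]

theorem pvAll_add (s : PySem.Set Int) (v : Int) (p : Int → Bool) :
    (PySem.Set.add s v).all p = (s.all p && p v) := by
  simp only [PySem.Set.add]
  split
  · rename_i h
    cases hv : p v
    · cases hall : s.all p
      · simp
      · exact absurd (List.all_eq_true.mp hall v (by simpa using h)) (by simp [hv])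
    · simp
  · simp

theorem pvDiscards_isEmpty (lop : List Int) (s : PySem.Set Int) :
    (lop.foldl PySem.Set.discard s).isEmpty = s.all (fun x => lop.contains x) := by
  induction lop generalizing s with
  | nil => cases s <;> simp
  | cons v t ih =>
    simp only [List.foldl_cons, ih, PySem.Set.discard]
    rw [List.all_filter]
    refine List.all_congr rfl ?_
    intro x
    by_cases hx : x = v <;> simp [hx]

theorem pvBuildB_eq (lop : List Int) (l : List (List Int)) (s : PySem.Set Int) :
    (match pvBuildB s l with
     | none => false
     | some r => (lop.foldl PySem.Set.discard r).isEmpty)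
      = (s.all (fun x => lop.contains x)
          && l.all (fun p => pvChk lop (p.getD 0 0) (p.getD 1 0))) := by
  induction l generalizing s with
  | nil => simp [pvBuildB, pvDiscards_isEmpty]
  | cons p rest ih =>
    cases hxy : pvCat (p.getD 0 0) (p.getD 1 0) with
    | none =>
      have hc : pvChk lop (p.getD 0 0) (p.getD 1 0) = false := by
        unfold pvChk; rw [hxy]
      simp only [pvBuildB, hxy, List.all_cons, hc]
      simp
    | some v =>
      have hc : pvChk lop (p.getD 0 0) (p.getD 1 0) = lop.contains v := by
        unfold pvChk; rw [hxy]
      simp only [pvBuildB, hxy, List.all_cons, hc]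
      rw [ih, pvAll_add]
      cases lop.contains v <;> cases s.all (fun x => lop.contains x) <;> simp

theorem pvAlt_eq_all (a b c d e : Int) (lop : List Int) :
    valid_five_alt a b c d e lop =
      (PySem.List.permutations [a, b, c, d, e] 2).all
        (fun p => pvChk lop (p.getD 0 0) (p.getD 1 0)) := by
  unfold valid_five_alt
  rw [pvBuildB_eq]
  simp [PySem.Set.empty]

theorem pvComb2_five (a b c d e : Int) :
    pvComb2 [a, b, c, d, e] =
      [(a,b),(a,c),(a,d),(a,e),(b,c),(b,d),(b,e),(c,d),(c,e),(d,e)] := by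
  simp [pvComb2]

theorem pvPerm2_five (a b c d e : Int) :
    PySem.List.permutations [a, b, c, d, e] 2 =
      [[a,b],[a,c],[a,d],[a,e],[b,a],[b,c],[b,d],[b,e],[c,a],[c,b],[c,d],[c,e],
       [d,a],[d,b],[d,c],[d,e],[e,a],[e,b],[e,c],[e,d]] := by
  simp [PySem.List.permutations, List.range_succ]

-- ===== VERDICT (by name: the statement is the Claim_ definition above) =====
theorem valid_five_spec : Claim_equal_valid_five := by
  intro a b c d e lop _ _
  unfold Spec_valid_five
  rw [pvAlt_eq_all]
  unfold valid_five
  rw [pvLoopA_eq_all, pvComb2_five, pvPerm2_five]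
  simp only [List.all_cons, List.all_nil, Bool.and_true, List.getD_cons_zero,
    List.getD_cons_succ]
  ac_rfl
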